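-- pv_equiv track=rewrite | github.com/infojunke/SAU | splunk_updater/file_manager.py | _extract_install_section
-- ===== SOURCE A (Python) =====
-- from typing import Dict, List, Optional
--
-- def _extract_install_section(app_conf_content: str) -> Optional[str]:
--     """Extract [install] section from app.conf"""
--     lines = app_conf_content.split('\n')
--     install_section = []
--     in_install_section = False
--
--     for line in lines:
--         stripped = line.strip()
--         if stripped == '[install]':
--             in_install_section = True
--             install_section.append(line)
--         elif in_install_section:
--             if stripped.startswith('['):
--                 # New section started
--                 break
--             install_section.append(line)
--
--     return '\n'.join(install_section) if install_section else None
-- ===== SOURCE B (Python) =====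
-- def _extract_install_section(app_conf_content):
--     lines = app_conf_content.split('\n')
--     header_positions = [i for i, line in enumerate(lines) if line.strip().startswith('[')]
--     section_ends = header_positions[1:] + [len(lines)]
--     for start, end in zip(header_positions, section_ends):
--         if lines[start].strip() == '[install]':
--             return '\n'.join(lines[start:end])
--     return None
-- ===== Notes on version B (the rewrite author's own statement) =====
-- stated objective: alternative
-- what changed: Replaces A's single flag-and-accumulator loop by a section-boundary table: index all header lines once, pair each header with the start of the next section, and slice the lines between the '[install]' header and the next header.
-- intended difference: On inputs where another '[install]' header line follows the [install] section before any other header, A's branch order swallows that duplicate header and the lines after it into the returned section, while B ends the section at the next header of any kind, which is the intended sectioning of an INI-style file. — e.g. on _extract_install_section("[install]\n[install]"): A returns some "[install]\n[install]", B returns some "[install]"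
import Mathlib
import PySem

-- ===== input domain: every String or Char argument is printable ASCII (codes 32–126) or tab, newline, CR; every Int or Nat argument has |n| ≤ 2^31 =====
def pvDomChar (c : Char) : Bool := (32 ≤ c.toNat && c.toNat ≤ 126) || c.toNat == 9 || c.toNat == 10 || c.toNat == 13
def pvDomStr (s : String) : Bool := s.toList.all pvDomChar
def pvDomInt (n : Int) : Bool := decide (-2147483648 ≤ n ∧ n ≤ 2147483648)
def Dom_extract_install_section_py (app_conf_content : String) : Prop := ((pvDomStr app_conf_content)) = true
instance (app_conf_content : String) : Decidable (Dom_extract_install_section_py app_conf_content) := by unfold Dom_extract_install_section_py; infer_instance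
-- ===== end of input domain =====

-- B replaces A's flag-and-accumulator loop by a header-position table with section boundaries (objective: alternative).

-- ===== PORT A =====
-- the for-loop of A: state = (accumulated section, in_install_section flag)
def pvALoop : List (List Char) → List (List Char) → Bool → List (List Char)
  | [], acc, _ => acc
  | l :: rest, acc, inSec =>
    let stripped := PySem.Chars.strip l
    if stripped = "[install]".toList then pvALoop rest (acc ++ [l]) true
    else if inSec then
      if PySem.Chars.startswith stripped "[".toList then acc   -- break
      else pvALoop rest (acc ++ [l]) inSec
    else pvALoop rest acc inSec

def extract_install_section_py (app_conf_content : String) : Option String :=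
  let lines := PySem.Chars.splitOn app_conf_content.toList "\n".toList
  let install_section := pvALoop lines [] false
  if install_section.isEmpty then none
  else some (String.ofList (PySem.Chars.join "\n".toList install_section))

-- ===== PORT B =====
-- Source B's for-loop over zip(header_positions, section_ends)
def pvBLoop (lines : List (List Char)) : List (Int × Int) → Option String
  | [] => none
  | (s, e) :: rest =>
    if PySem.Chars.strip (PySem.List.pyGetD lines s []) = "[install]".toList then
      some (String.ofList (PySem.Chars.join "\n".toList (PySem.List.slice lines (some s) (some e))))
    else pvBLoop lines rest

def extract_install_section_py_alt (app_conf_content : String) : Option String :=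
  let lines := PySem.Chars.splitOn app_conf_content.toList "\n".toList
  let header_positions := ((PySem.List.enumerate lines).filter
      fun p => PySem.Chars.startswith (PySem.Chars.strip p.2) "[".toList).map (·.1)
  let section_ends := header_positions.drop 1 ++ [(lines.length : Int)]
  pvBLoop lines (header_positions.zip section_ends)

-- ===== PRECONDITION & SPEC =====
-- On inputs where another '[install]' header follows the [install] section before any other
-- header, A swallows it into the returned section; B ends the section at the next header of
-- any kind, the intended sectioning.
def pvDb (ls : List (List Char)) : Bool :=
  ((((ls.map PySem.Chars.strip).filter (PySem.Chars.startswith · "[".toList)).dropWhile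
      (· != "[install]".toList)).drop 1).head? == some "[install]".toList

def D_extract_install_section_py (app_conf_content : String) : Prop :=
  pvDb (PySem.Chars.splitOn app_conf_content.toList "\n".toList) = true
instance (app_conf_content : String) : Decidable (D_extract_install_section_py app_conf_content) := by
  unfold D_extract_install_section_py; infer_instance

def Spec_extract_install_section_py (app_conf_content : String) (out : Option String) : Prop :=
  ¬ D_extract_install_section_py app_conf_content → out = extract_install_section_py_alt app_conf_content
instance (app_conf_content : String) (out : Option String) : Decidable (Spec_extract_install_section_py app_conf_content out) := by
  unfold Spec_extract_install_section_py; infer_instance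

def pvDiffWitness_extract_install_section_py : String := "[install]\n[install]"
def pvDiffWitnessOut_extract_install_section_py : (Option String) × (Option String) :=
  (some "[install]\n[install]", some "[install]")

-- ===== CLAIM =====
def Claim_unchanged_extract_install_section_py : Prop := ∀ (app_conf_content : String), Dom_extract_install_section_py app_conf_content → Spec_extract_install_section_py app_conf_content (extract_install_section_py app_conf_content)
def Claim_changed_extract_install_section_py : Prop := Dom_extract_install_section_py (pvDiffWitness_extract_install_section_py) ∧ D_extract_install_section_py (pvDiffWitness_extract_install_section_py) ∧ extract_install_section_py (pvDiffWitness_extract_install_section_py) = pvDiffWitnessOut_extract_install_section_py.1 ∧ extract_install_section_py_alt (pvDiffWitness_extract_install_section_py) = pvDiffWitnessOut_extract_install_section_py.2 ∧ pvDiffWitnessOut_extract_install_section_py.1 ≠ pvDiffWitnessOut_extract_install_section_py.2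
def Claim_exact_extract_install_section_py : Prop := ∀ (app_conf_content : String), Dom_extract_install_section_py app_conf_content → D_extract_install_section_py app_conf_content → extract_install_section_py app_conf_content ≠ extract_install_section_py_alt app_conf_content

-- ===== LEMMAS AND PROOFS =====

-- stripped line starts a section header
def pvHdr (l : List Char) : Bool := PySem.Chars.startswith (PySem.Chars.strip l) "[".toList

-- A-side characterisation: take-until-a-foreign-header
def pvTakeA : List (List Char) → List (List Char)
  | [] => []
  | l :: rest =>
    if pvHdr l && (PySem.Chars.strip l != "[install]".toList) then []
    else l :: pvTakeA rest

def pvFindA : List (List Char) → Option (List (List Char))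
  | [] => none
  | l :: rest =>
    if PySem.Chars.strip l = "[install]".toList then some (l :: pvTakeA rest) else pvFindA rest

-- B-side characterisation: take-until-any-header
def pvFindB : List (List Char) → Option (List (List Char))
  | [] => none
  | l :: rest =>
    if PySem.Chars.strip l = "[install]".toList then some (l :: rest.takeWhile (fun x => !pvHdr x))
    else pvFindB rest

def pvJoin (sec : List (List Char)) : String := String.ofList (PySem.Chars.join "\n".toList sec)

-- header positions, Nat-level
def pvHp : List (List Char) → Nat → List Nat
  | [], _ => []
  | l :: t, k => (if pvHdr l then [k] else []) ++ pvHp t (k + 1)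

lemma pvHdr_of_install {l : List Char} (h : PySem.Chars.strip l = "[install]".toList) : pvHdr l = true := by
  rw [pvHdr, h]; decide

lemma pvHp_ge : ∀ (ls : List (List Char)) (k x : Nat), x ∈ pvHp ls k → k ≤ x := by
  intro ls
  induction ls with
  | nil => intro k x h; simp [pvHp] at h
  | cons l t ih =>
    intro k x h
    by_cases hl : pvHdr l = true
    · simp [pvHp, hl] at h
      rcases h with h | h
      · omega
      · exact Nat.le_of_succ_le (ih (k + 1) x h)
    · simp [pvHp, hl] at h
      exact Nat.le_of_succ_le (ih (k + 1) x h)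

lemma pvDrop_getD {lines : List (List Char)} {k : Nat} {l : List Char} {t : List (List Char)}
    (h : lines.drop k = l :: t) : lines.getD k [] = l := by
  have h0 : lines[k]? = some l := by
    have h1 : (List.drop k lines)[0]? = lines[k + 0]? := List.getElem?_drop
    rw [h] at h1; simpa using h1.symm
  simp [List.getD_eq_getElem?_getD, h0]

lemma pvDrop_succ {lines : List (List Char)} {k : Nat} {l : List Char} {t : List (List Char)}
    (h : lines.drop k = l :: t) : lines.drop (k + 1) = t := by
  have h2 : List.drop 1 (List.drop k lines) = List.drop (k + 1) lines := by rw [List.drop_drop]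
  rw [← h2, h]; rfl

lemma pvDrop_lt {lines : List (List Char)} {k : Nat} {l : List Char} {t : List (List Char)}
    (h : lines.drop k = l :: t) : k < lines.length := by
  by_contra hc
  rw [List.drop_eq_nil_of_le (Nat.le_of_not_lt hc)] at h
  exact absurd h (by simp)

-- the first header position (default: list length) bounds from below
lemma pvHeadD_ge {lines : List (List Char)} {t : List (List Char)} {k : Nat}
    (hk : k ≤ lines.length) : k ≤ (pvHp t k).headD lines.length := by
  cases h : pvHp t k with
  | nil => simpa using hk
  | cons a t' =>
    have : a ∈ pvHp t k := by rw [h]; exact List.mem_cons_self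
    simpa using pvHp_ge t k a this

-- taking up to the next header position = takeWhile not-header
lemma pvTake : ∀ (t : List (List Char)) (k : Nat) (lines : List (List Char)), lines.drop k = t →
    t.take ((pvHp t k).headD lines.length - k) = t.takeWhile (fun x => !pvHdr x) := by
  intro t
  induction t with
  | nil => intro k lines _; simp
  | cons r t' ih =>
    intro k lines hdrop
    by_cases hH : pvHdr r = true
    · simp [pvHp, hH]
    · have hk1 : k + 1 ≤ lines.length := pvDrop_lt hdrop
      have he : k + 1 ≤ (pvHp t' (k + 1)).headD lines.length := pvHeadD_ge hk1
      have harith : (pvHp t' (k + 1)).headD lines.length - k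
          = ((pvHp t' (k + 1)).headD lines.length - (k + 1)) + 1 := by omega
      simp only [pvHp, hH, Bool.false_eq_true, if_false, List.nil_append, harith,
        List.take_succ_cons, List.takeWhile_cons, Bool.not_false]
      rw [ih (k + 1) lines (pvDrop_succ hdrop)]
      simp

-- the zip of header positions with section ends, consumed by pvBLoop, finds the same section
lemma pvZ : ∀ (ls : List (List Char)) (k : Nat) (lines : List (List Char)), lines.drop k = ls →
    pvBLoop lines (((pvHp ls k).zip ((pvHp ls k).drop 1 ++ [lines.length])).map
        (fun p => ((p.1 : Int), (p.2 : Int))))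
      = (pvFindB ls).map pvJoin := by
  intro ls
  induction ls with
  | nil => intro k lines _; simp [pvHp, pvFindB, pvBLoop]
  | cons l t ih =>
    intro k lines hdrop
    by_cases hH : pvHdr l = true
    · have hget : lines.getD k [] = l := pvDrop_getD hdrop
      have hpair : ((k :: pvHp t (k + 1)).zip ((k :: pvHp t (k + 1)).drop 1 ++ [lines.length]))
          = (k, (pvHp t (k + 1)).headD lines.length)
            :: ((pvHp t (k + 1)).zip ((pvHp t (k + 1)).drop 1 ++ [lines.length])) := by
        cases pvHp t (k + 1) <;> simp
      have hhp : pvHp (l :: t) k = k :: pvHp t (k + 1) := by simp [pvHp, hH]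
      rw [hhp, hpair]
      by_cases hi : PySem.Chars.strip l = "[install]".toList
      · have hk1 : k + 1 ≤ lines.length := pvDrop_lt hdrop
        have he : k + 1 ≤ (pvHp t (k + 1)).headD lines.length := pvHeadD_ge hk1
        have hslice : PySem.List.slice lines (some (k : Int))
            (some (((pvHp t (k + 1)).headD lines.length : Nat) : Int))
            = l :: t.take ((pvHp t (k + 1)).headD lines.length - (k + 1)) := by
          rw [PySem.List.slice_natCast, hdrop]
          have harith : (pvHp t (k + 1)).headD lines.length - k
              = ((pvHp t (k + 1)).headD lines.length - (k + 1)) + 1 := by omega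
          rw [harith, List.take_succ_cons]
        simp only [pvBLoop, List.map_cons, PySem.List.pyGetD_natCast, hget]
        rw [if_pos hi, hslice, pvTake t (k + 1) lines (pvDrop_succ hdrop)]
        simp only [pvFindB]
        rw [if_pos hi]
        simp [pvJoin]
      · simp only [pvBLoop, List.map_cons, PySem.List.pyGetD_natCast, hget]
        rw [if_neg hi]
        simp only [pvFindB]
        rw [if_neg hi]
        exact ih (k + 1) lines (pvDrop_succ hdrop)
    · have hni : ¬ (PySem.Chars.strip l = "[install]".toList) := fun h => by
        rw [pvHdr_of_install h] at hH; exact hH rfl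
      have hhp : pvHp (l :: t) k = pvHp t (k + 1) := by simp [pvHp, hH]
      rw [hhp]
      simp only [pvFindB]
      rw [if_neg hni]
      exact ih (k + 1) lines (pvDrop_succ hdrop)

lemma pvB_eq (ls : List (List Char)) :
    pvBLoop ls ((((PySem.List.enumerate ls).filter
        fun p => PySem.Chars.startswith (PySem.Chars.strip p.2) "[".toList).map (·.1)).zip
      ((((PySem.List.enumerate ls).filter
        fun p => PySem.Chars.startswith (PySem.Chars.strip p.2) "[".toList).map (·.1)).drop 1 ++ [(ls.length : Int)]))
      = (pvFindB ls).map pvJoin := by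
  have henum : ∀ (t : List (List Char)) (k : Nat),
      (((PySem.List.enumerate t (k : Int)).filter
        fun p => PySem.Chars.startswith (PySem.Chars.strip p.2) "[".toList).map (·.1))
        = (pvHp t k).map (Nat.cast : Nat → Int) := by
    intro t
    induction t with
    | nil => intro k; simp [PySem.List.enumerate_nil, pvHp]
    | cons l t ih =>
      intro k
      rw [PySem.List.enumerate_cons]
      have hcast : ((k : Int) + 1) = (((k + 1 : Nat)) : Int) := by push_cast; ring
      rw [List.filter_cons]
      by_cases hl : PySem.Chars.startswith (PySem.Chars.strip l) "[".toList = true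
      · simp only [hl, if_true, List.map_cons, hcast, ih (k + 1)]
        simp only [pvHp, pvHdr]
        rw [if_pos hl]
        simp
      · simp only [hl, Bool.false_eq_true, if_false, hcast, ih (k + 1)]
        simp only [pvHp, pvHdr]
        rw [if_neg hl]
        simp
  have h0 := henum ls 0
  rw [Nat.cast_zero] at h0
  rw [h0]
  have hmap : ((pvHp ls 0).map (Nat.cast : Nat → Int)).zip
      (((pvHp ls 0).map (Nat.cast : Nat → Int)).drop 1 ++ [(ls.length : Int)])
      = ((pvHp ls 0).zip ((pvHp ls 0).drop 1 ++ [ls.length])).map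
          (fun p => ((p.1 : Int), (p.2 : Int))) := by
    rw [← List.map_drop]
    have h1 : ([(ls.length : Int)] : List Int) = [ls.length].map (Nat.cast : Nat → Int) := by simp
    rw [h1, ← List.map_append, List.zip_map]
    simp [Prod.map]
  rw [hmap]
  exact pvZ ls 0 ls (by simp)

lemma pvALoop_true (rest : List (List Char)) : ∀ acc, pvALoop rest acc true = acc ++ pvTakeA rest := by
  induction rest with
  | nil => intro acc; simp [pvALoop, pvTakeA]
  | cons l rest ih =>
    intro acc
    rw [pvALoop]
    by_cases h : PySem.Chars.strip l = "[install]".toList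
    · rw [if_pos h, ih]
      have hta : pvTakeA (l :: rest) = l :: pvTakeA rest := by
        rw [pvTakeA, if_neg (by simp only [Bool.and_eq_true, bne_iff_ne]; exact fun hc => hc.2 h)]
      rw [hta]
      simp
    · rw [if_neg h, if_pos rfl]
      by_cases hs : PySem.Chars.startswith (PySem.Chars.strip l) "[".toList = true
      · rw [if_pos hs]
        have hta : pvTakeA (l :: rest) = [] := by
          rw [pvTakeA, if_pos (by simp only [pvHdr, Bool.and_eq_true, bne_iff_ne]; exact ⟨hs, h⟩)]
        rw [hta, List.append_nil]
      · rw [if_neg hs, ih]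
        have hta : pvTakeA (l :: rest) = l :: pvTakeA rest := by
          rw [pvTakeA, if_neg (by simp only [pvHdr, Bool.and_eq_true]; exact fun hc => hs hc.1)]
        rw [hta]
        simp

lemma pvA_eq (ls : List (List Char)) :
    (if (pvALoop ls [] false).isEmpty then none
     else some (String.ofList (PySem.Chars.join "\n".toList (pvALoop ls [] false))))
      = (pvFindA ls).map pvJoin := by
  induction ls with
  | nil => simp [pvALoop, pvFindA]
  | cons l rest ih =>
    rw [pvALoop]
    by_cases h : PySem.Chars.strip l = "[install]".toList
    · rw [if_pos h, pvALoop_true]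
      simp only [pvFindA]
      rw [if_pos h]
      simp [pvJoin]
    · rw [if_neg h]
      simp only [Bool.false_eq_true, if_false]
      simp only [pvFindA]
      rw [if_neg h]
      exact ih

-- outside D: the take-until predicates agree (no duplicate [install] header is met)
lemma pvTW : ∀ (rest : List (List Char)),
    (∀ h ∈ (rest.dropWhile (fun x => !pvHdr x)).head?, ¬ PySem.Chars.strip h = "[install]".toList) →
    pvTakeA rest = rest.takeWhile (fun x => !pvHdr x) := by
  intro rest
  induction rest with
  | nil => intro _; simp [pvTakeA]
  | cons r t ih =>
    intro hc
    by_cases hH : pvHdr r = true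
    · have hr : ¬ PySem.Chars.strip r = "[install]".toList := by
        apply hc
        rw [List.dropWhile_cons, if_neg (by rw [hH]; simp)]
        simp
      have hta : pvTakeA (r :: t) = [] := by
        rw [pvTakeA, if_pos (by simp only [Bool.and_eq_true, bne_iff_ne]; exact ⟨hH, hr⟩)]
      rw [hta, List.takeWhile_cons, if_neg (by rw [hH]; simp)]
    · have hH' : pvHdr r = false := by revert hH; cases pvHdr r <;> simp
      rw [List.dropWhile_cons, if_pos (by rw [hH']; rfl)] at hc
      have hta : pvTakeA (r :: t) = r :: pvTakeA t := by
        rw [pvTakeA, if_neg (by simp only [Bool.and_eq_true]; exact fun hcc => hH hcc.1)]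
      rw [hta, List.takeWhile_cons, if_pos (by rw [hH']; rfl), ih hc]

-- proof-side restatement of pvDb over the raw lines, and the bridge
def pvDbX (ls : List (List Char)) : Bool :=
  ((((ls.dropWhile (fun l => PySem.Chars.strip l != "[install]".toList)).drop 1).dropWhile
      (fun l => !pvHdr l)).head?.map
    (fun h => PySem.Chars.strip h == "[install]".toList)).getD false

lemma pvHead_filter : ∀ (t : List (List Char)),
    ((t.map PySem.Chars.strip).filter (PySem.Chars.startswith · "[".toList)).head?
      = ((t.dropWhile (fun l => !pvHdr l)).head?).map PySem.Chars.strip := by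
  intro t
  induction t with
  | nil => simp
  | cons r t ih =>
    by_cases hH : pvHdr r = true
    · rw [List.map_cons, List.filter_cons, if_pos (show PySem.Chars.startswith (PySem.Chars.strip r) "[".toList = true from hH),
        List.dropWhile_cons, if_neg (by rw [hH]; simp)]
      simp
    · have hH' : pvHdr r = false := by revert hH; cases pvHdr r <;> simp
      rw [List.map_cons, List.filter_cons,
        if_neg (show ¬ (PySem.Chars.startswith (PySem.Chars.strip r) "[".toList = true) from hH),
        List.dropWhile_cons, if_pos (by rw [hH']; rfl)]
      exact ih

lemma pvDb_eq : ∀ (ls : List (List Char)), pvDb ls = pvDbX ls := by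
  intro ls
  induction ls with
  | nil => rfl
  | cons l t ih =>
    by_cases hi : PySem.Chars.strip l = "[install]".toList
    · rw [pvDb, pvDbX, List.map_cons, List.filter_cons,
        if_pos (show PySem.Chars.startswith (PySem.Chars.strip l) "[".toList = true from pvHdr_of_install hi),
        List.dropWhile_cons, if_neg (by rw [hi]; simp),
        List.dropWhile_cons, if_neg (by simp only [bne_iff_ne]; exact fun hc => hc hi),
        List.drop_succ_cons, List.drop_zero, List.drop_succ_cons, List.drop_zero,
        pvHead_filter t]
      cases (t.dropWhile (fun l => !pvHdr l)).head? <;> simp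
    · rw [pvDb, pvDbX, List.dropWhile_cons, if_pos (by simp only [bne_iff_ne]; exact hi),
        List.map_cons, List.filter_cons]
      by_cases hH : pvHdr l = true
      · rw [if_pos (show PySem.Chars.startswith (PySem.Chars.strip l) "[".toList = true from hH), List.dropWhile_cons,
          if_pos (by simp only [bne_iff_ne]; exact hi)]
        rw [pvDb, pvDbX] at ih
        exact ih
      · rw [if_neg (show ¬ (PySem.Chars.startswith (PySem.Chars.strip l) "[".toList = true) from hH)]
        rw [pvDb, pvDbX] at ih
        exact ih

lemma pvAB_eq : ∀ (ls : List (List Char)), pvDbX ls = false → pvFindA ls = pvFindB ls := by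
  intro ls
  induction ls with
  | nil => intro _; rfl
  | cons l t ih =>
    intro hD
    by_cases hi : PySem.Chars.strip l = "[install]".toList
    · rw [pvDbX, List.dropWhile_cons,
        if_neg (by simp only [bne_iff_ne]; exact fun hc => hc hi),
        List.drop_succ_cons, List.drop_zero] at hD
      have hcond : ∀ h ∈ (t.dropWhile (fun x => !pvHdr x)).head?, ¬ PySem.Chars.strip h = "[install]".toList := by
        intro h hmem
        cases hdw : t.dropWhile (fun x => !pvHdr x) with
        | nil => rw [hdw] at hmem; simp at hmem
        | cons h' t' =>
          rw [hdw] at hmem hD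
          simp only [List.head?_cons, Option.mem_some_iff] at hmem
          subst hmem
          simp only [List.head?_cons, Option.map_some, Option.getD_some, beq_eq_false_iff_ne,
            ne_eq] at hD
          exact hD
      simp only [pvFindA, pvFindB]
      rw [if_pos hi, if_pos hi, pvTW t hcond]
    · have hDt : pvDbX t = false := by
        rw [pvDbX] at hD ⊢
        rw [List.dropWhile_cons, if_pos (by simp only [bne_iff_ne]; exact hi)] at hD
        exact hD
      simp only [pvFindA, pvFindB]
      rw [if_neg hi, if_neg hi, ih hDt]

-- inside D: A's section strictly extends B's section
lemma pvTakeA_split : ∀ (rest : List (List Char)) (h : List Char) (t' : List (List Char)),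
    rest.dropWhile (fun x => !pvHdr x) = h :: t' → PySem.Chars.strip h = "[install]".toList →
    pvTakeA rest = rest.takeWhile (fun x => !pvHdr x) ++ h :: pvTakeA t' := by
  intro rest
  induction rest with
  | nil => intro h t' hdw _; simp at hdw
  | cons r t ih =>
    intro h t' hdw hinst
    by_cases hH : pvHdr r = true
    · rw [List.dropWhile_cons, if_neg (by rw [hH]; simp)] at hdw
      injection hdw with h1 h2
      subst h1
      subst h2
      have hta : pvTakeA (r :: t) = r :: pvTakeA t := by
        rw [pvTakeA, if_neg (by simp only [Bool.and_eq_true, bne_iff_ne]; exact fun hc => hc.2 hinst)]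
      rw [hta, List.takeWhile_cons, if_neg (by rw [hH]; simp)]
      simp
    · have hH' : pvHdr r = false := by revert hH; cases pvHdr r <;> simp
      rw [List.dropWhile_cons, if_pos (by rw [hH']; rfl)] at hdw
      have hta : pvTakeA (r :: t) = r :: pvTakeA t := by
        rw [pvTakeA, if_neg (by simp only [Bool.and_eq_true]; exact fun hc => hH hc.1)]
      rw [hta, List.takeWhile_cons, if_pos (by rw [hH']; rfl), ih h t' hdw hinst]
      simp

lemma pvDiff : ∀ (ls : List (List Char)), pvDbX ls = true →
    ∃ l w h t', pvFindB ls = some (l :: w) ∧ pvFindA ls = some (l :: (w ++ h :: t')) := by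
  intro ls
  induction ls with
  | nil => intro hD; simp [pvDbX] at hD
  | cons l t ih =>
    intro hD
    by_cases hi : PySem.Chars.strip l = "[install]".toList
    · rw [pvDbX, List.dropWhile_cons,
        if_neg (by simp only [bne_iff_ne]; exact fun hc => hc hi),
        List.drop_succ_cons, List.drop_zero] at hD
      cases hdw : t.dropWhile (fun x => !pvHdr x) with
      | nil => rw [hdw] at hD; simp at hD
      | cons h t' =>
        rw [hdw] at hD
        simp only [List.head?_cons, Option.map_some, Option.getD_some, beq_iff_eq] at hD
        refine ⟨l, t.takeWhile (fun x => !pvHdr x), h, pvTakeA t', ?_, ?_⟩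
        · simp only [pvFindB]
          rw [if_pos hi]
        · simp only [pvFindA]
          rw [if_pos hi, pvTakeA_split t h t' hdw hD]
    · rw [pvDbX, List.dropWhile_cons, if_pos (by simp only [bne_iff_ne]; exact hi)] at hD
      have hDt : pvDbX t = true := by rw [pvDbX]; exact hD
      obtain ⟨l', w, h, t', hB, hA⟩ := ih hDt
      refine ⟨l', w, h, t', ?_, ?_⟩
      · simp only [pvFindB]
        rw [if_neg hi]
        exact hB
      · simp only [pvFindA]
        rw [if_neg hi]
        exact hA

lemma pvJoinLen (sep : List Char) : ∀ (ys : List (List Char)) (x : List Char),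
    (PySem.Chars.join sep (x :: ys)).length
      = x.length + (ys.map (fun y => sep.length + y.length)).sum := by
  intro ys
  induction ys with
  | nil => intro x; rw [PySem.Chars.join_singleton]; simp
  | cons y t ih =>
    intro x
    rw [PySem.Chars.join_cons_cons]
    simp [ih y]
    omega

lemma pvJoin_ne (l : List Char) (w : List (List Char)) (h : List Char) (t' : List (List Char)) :
    pvJoin (l :: w) ≠ pvJoin (l :: (w ++ h :: t')) := by
  intro heq
  have hlist : PySem.Chars.join "\n".toList (l :: w)
      = PySem.Chars.join "\n".toList (l :: (w ++ h :: t')) := by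
    have := congrArg String.toList heq
    simpa [pvJoin] using this
  have hlen := congrArg List.length hlist
  rw [pvJoinLen, pvJoinLen] at hlen
  simp at hlen

-- ===== VERDICT =====
theorem extract_install_section_py_spec : Claim_unchanged_extract_install_section_py := by
  intro s _ hD
  have hDb : pvDbX (PySem.Chars.splitOn s.toList "\n".toList) = false := by
    rw [← pvDb_eq]
    unfold D_extract_install_section_py at hD
    exact Bool.not_eq_true _ ▸ (by simpa using hD)
  show extract_install_section_py s = extract_install_section_py_alt s
  unfold extract_install_section_py extract_install_section_py_alt
  simp only []
  rw [pvA_eq, pvB_eq, pvAB_eq _ hDb]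

theorem extract_install_section_py_changed : Claim_changed_extract_install_section_py := by
  unfold Claim_changed_extract_install_section_py; decide

theorem extract_install_section_py_tight : Claim_exact_extract_install_section_py := by
  intro s _ hD
  have hDb : pvDbX (PySem.Chars.splitOn s.toList "\n".toList) = true := by
    rw [← pvDb_eq]; exact hD
  obtain ⟨l, w, h, t', hB, hA⟩ := pvDiff _ hDb
  intro heq
  unfold extract_install_section_py extract_install_section_py_alt at heq
  simp only [] at heq
  rw [pvA_eq, pvB_eq, hA, hB] at heq
  simp only [Option.map_some, Option.some.injEq] at heq
  exact pvJoin_ne l w h t' heq.symm
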